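-- pv_equiv track=rewrite | github.com/DonKoton/codeWars | 7_kyu/parts_of_a_list.py | partlist
-- ===== SOURCE A (Python) =====
-- def partlist(arr):
--     counter = 1
--     result = []
--     for _ in range(len(arr)):
--         string1 = ' '.join([word for word in arr[:counter]])
--         string2 = ' '.join([word for word in arr[counter:]])
--         result.append((string1, string2))
--         counter += 1
--     return result[:-1]
-- ===== SOURCE B (Python) =====
-- def partlist(arr):
--     n = len(arr)
--     if n < 2:
--         return []
--     # pass 1: left-to-right prefix table; pref[i] joins arr[:i+1]
--     pref = [arr[0]]
--     for w in arr[1:]: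
--         pref.append(pref[-1] + ' ' + w)
--     # pass 2: right-to-left suffix table; after reversing, suf[i] joins arr[i:]
--     suf = [arr[-1]]
--     for w in reversed(arr[:-1]):
--         suf.append(w + ' ' + suf[-1])
--     suf.reverse()
--     # pass 3: zip the two tables
--     return [(pref[i - 1], suf[i]) for i in range(1, n)]
-- ===== Notes on version B (the rewrite author's own statement) =====
-- stated objective: alternative
-- what changed: A re-joins both slices from scratch for every split point (quadratic in total text); B does two directional passes building incremental prefix/suffix join tables and then zips them, so each split reuses the previous join.
import Mathlib
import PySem

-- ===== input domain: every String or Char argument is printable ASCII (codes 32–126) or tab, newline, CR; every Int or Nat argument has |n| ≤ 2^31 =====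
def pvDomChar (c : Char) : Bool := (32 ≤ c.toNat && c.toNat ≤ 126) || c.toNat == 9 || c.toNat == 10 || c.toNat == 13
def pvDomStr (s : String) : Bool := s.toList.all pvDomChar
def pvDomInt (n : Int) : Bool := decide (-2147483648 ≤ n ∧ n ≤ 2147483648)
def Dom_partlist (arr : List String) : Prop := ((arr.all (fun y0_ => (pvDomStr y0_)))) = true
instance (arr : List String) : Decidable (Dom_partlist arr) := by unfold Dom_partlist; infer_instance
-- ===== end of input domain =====

-- B replaces A's per-split re-joining of both slices by two directional passes that build
-- incremental prefix/suffix join tables and a final zip pass (alternative decomposition).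

-- ===== PORT A =====
def partlist (arr : List String) : List (String × String) :=
  let init : Int × List (String × String) := (1, [])
  let res := (PySem.List.pyRange 0 (arr.length : Int) 1).foldl
    (fun st _ =>
      let string1 := PySem.Str.join " " ((PySem.List.slice arr none (some st.1)).map (fun word => word))
      let string2 := PySem.Str.join " " ((PySem.List.slice arr (some st.1) none).map (fun word => word))
      (st.1 + 1, st.2 ++ [(string1, string2)]))
    init
  PySem.List.slice res.2 none (some (-1))

-- ===== PORT B =====
def partlist_alt (arr : List String) : List (String × String) :=
  let n : Int := arr.length
  if n < 2 then []
  else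
    let pref := (PySem.List.slice arr (some 1) none).foldl
      (fun p w => p ++ [PySem.List.pyGetD p (-1) "" ++ " " ++ w])
      [PySem.List.pyGetD arr 0 ""]
    let suf0 := ((PySem.List.slice arr none (some (-1))).reverse).foldl
      (fun s w => s ++ [w ++ " " ++ PySem.List.pyGetD s (-1) ""])
      [PySem.List.pyGetD arr (-1) ""]
    let suf := suf0.reverse
    (PySem.List.pyRange 1 n 1).map (fun i =>
      (PySem.List.pyGetD pref (i - 1) "", PySem.List.pyGetD suf i ""))

-- ===== PRECONDITION & SPEC =====
def Spec_partlist (arr : List String) (out : List (String × String)) : Prop := out = partlist_alt arr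
instance (arr : List String) (out : List (String × String)) : Decidable (Spec_partlist arr out) := by unfold Spec_partlist; infer_instance

-- ===== CLAIM (what is proved, stated in full; the proofs are below) =====
def Claim_equal_partlist : Prop := ∀ (arr : List String), Dom_partlist arr → Spec_partlist arr (partlist arr)

-- ===== LEMMAS AND PROOFS =====

/-- ' '.join, abbreviated. -/
def J (l : List String) : String := PySem.Str.join " " l

/-- the split at index i. -/
def F (arr : List String) (i : Nat) : String × String := (J (arr.take i), J (arr.drop i))

theorem chars_join_snoc (sep : List Char) (ps : List (List Char)) (q : List Char) (h : ps ≠ []) :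
    PySem.Chars.join sep (ps ++ [q]) = PySem.Chars.join sep ps ++ sep ++ q := by
  induction ps with
  | nil => exact absurd rfl h
  | cons p t ih =>
    cases t with
    | nil => simp [PySem.Chars.join_cons_cons, PySem.Chars.join_singleton]
    | cons q' t' =>
      have ih' := ih (by simp)
      simp only [List.cons_append] at ih' ⊢
      rw [PySem.Chars.join_cons_cons, ih', PySem.Chars.join_cons_cons]
      simp [List.append_assoc]

theorem J_snoc (l : List String) (w : String) (h : l ≠ []) : J (l ++ [w]) = J l ++ " " ++ w := by
  apply String.toList_inj.mp
  simp only [J, PySem.Str.toList_join, List.map_append, List.map_cons, List.map_nil,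
    String.toList_append]
  rw [chars_join_snoc _ _ _ (by simpa using h)]

theorem J_cons (l : List String) (w : String) (h : l ≠ []) : J (w :: l) = w ++ " " ++ J l := by
  apply String.toList_inj.mp
  cases l with
  | nil => exact absurd rfl h
  | cons x t =>
    simp only [J, PySem.Str.toList_join, List.map_cons, String.toList_append]
    rw [PySem.Chars.join_cons_cons]

theorem J_single (w : String) : J [w] = w := by
  apply String.toList_inj.mp
  simp [J, PySem.Str.toList_join, PySem.Chars.join_singleton]

theorem pyRange_one (n : Nat) :
    PySem.List.pyRange 1 (n : Int) 1 = (List.range' 1 (n - 1)).map (fun k : Nat => (k : Int)) := by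
  simp only [PySem.List.pyRange, if_neg (by norm_num : (1:Int) ≠ 0), if_pos (by norm_num : (0:Int) < 1)]
  rw [List.range'_eq_map_range]
  by_cases h : (1:Int) < (n:Int)
  · rw [if_pos h]
    have : ((n:Int) - 1 + 1 - 1) / 1 = (n:Int) - 1 := by ring_nf; simp
    rw [this]
    have h2 : ((n:Int)-1).toNat = n - 1 := by omega
    rw [h2, List.map_map]
    apply List.map_congr_left
    intro a _
    simp
  · rw [if_neg h]
    have : n - 1 = 0 := by omega
    simp [this]

theorem foldA_spec (arr : List String) (l : List Int) : ∀ (k : Nat) (acc : List (String × String)),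
    l.foldl
      (fun st _ =>
        let string1 := PySem.Str.join " " ((PySem.List.slice arr none (some st.1)).map (fun word => word))
        let string2 := PySem.Str.join " " ((PySem.List.slice arr (some st.1) none).map (fun word => word))
        (st.1 + 1, st.2 ++ [(string1, string2)]))
      ((k : Int), acc)
    = (((k + l.length : Nat) : Int), acc ++ (List.range' k l.length).map (F arr)) := by
  induction l with
  | nil => simp
  | cons x t ih =>
    intro k acc
    simp only [List.foldl_cons, List.length_cons, List.range'_succ, List.map_cons]
    rw [PySem.List.slice_to_natCast, PySem.List.slice_from_natCast, List.map_id']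
    have h1 : ((k : Int) + 1) = ((k + 1 : Nat) : Int) := by push_cast; ring
    rw [h1, ih (k+1)]
    have h2 : k + 1 + t.length = k + (t.length + 1) := by omega
    simp [F, J, h2, List.map_id']

theorem range'_dropLast (s n : Nat) : (List.range' s n).dropLast = List.range' s (n - 1) := by
  cases n with
  | zero => simp
  | succ m => rw [List.range'_concat]; simp

theorem A_closed (arr : List String) :
    partlist arr = (List.range' 1 (arr.length - 1)).map (F arr) := by
  have key := foldA_spec arr (PySem.List.pyRange 0 (arr.length : Int) 1) 1 []
  norm_num at key
  unfold partlist
  simp only [List.map_id']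
  rw [key, PySem.List.slice_to_neg_one]
  simp [← List.map_dropLast, range'_dropLast]

/-- the values appended by B's prefix pass, starting from running join x. -/
def prefs (x : String) : List String → List String
  | [] => []
  | w :: t => (x ++ " " ++ w) :: prefs (x ++ " " ++ w) t

/-- the values appended by B's suffix pass, starting from running join x. -/
def sufs (x : String) : List String → List String
  | [] => []
  | w :: t => (w ++ " " ++ x) :: sufs (w ++ " " ++ x) t

theorem prefFold (l : List String) : ∀ (acc : List String) (x : String),
    l.foldl (fun p w => p ++ [PySem.List.pyGetD p (-1) "" ++ " " ++ w]) (acc ++ [x])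
    = acc ++ [x] ++ prefs x l := by
  induction l with
  | nil => simp [prefs]
  | cons w t ih =>
    intro acc x
    simp only [List.foldl_cons, PySem.List.pyGetD_neg_one_append_singleton, prefs]
    rw [List.append_assoc acc [x]]
    rw [show acc ++ ([x] ++ [x ++ " " ++ w]) = (acc ++ [x]) ++ [x ++ " " ++ w] by simp]
    rw [ih (acc ++ [x]) (x ++ " " ++ w)]
    simp

theorem sufFold (l : List String) : ∀ (acc : List String) (x : String),
    l.foldl (fun s w => s ++ [w ++ " " ++ PySem.List.pyGetD s (-1) ""]) (acc ++ [x])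
    = acc ++ [x] ++ sufs x l := by
  induction l with
  | nil => simp [sufs]
  | cons w t ih =>
    intro acc x
    simp only [List.foldl_cons, PySem.List.pyGetD_neg_one_append_singleton, sufs]
    rw [show acc ++ [x] ++ [w ++ " " ++ x] = (acc ++ [x]) ++ [w ++ " " ++ x] by simp]
    rw [ih (acc ++ [x]) (w ++ " " ++ x)]
    simp

theorem prefs_spec (rest : List String) : ∀ (pre : List String), pre ≠ [] →
    prefs (J pre) rest
    = (List.range' (pre.length + 1) rest.length).map (fun i => J ((pre ++ rest).take i)) := by
  induction rest with
  | nil => intro pre _; simp [prefs]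
  | cons w t ih =>
    intro pre hpre
    simp only [prefs, List.length_cons, List.range'_succ, List.map_cons]
    rw [← J_snoc pre w hpre]
    have hassoc : pre ++ w :: t = (pre ++ [w]) ++ t := by simp
    have htake : List.take (pre.length + 1) (pre ++ w :: t) = pre ++ [w] := by
      rw [hassoc, List.take_left' (by simp)]
    rw [htake, ih (pre ++ [w]) (by simp)]
    simp [← hassoc]

theorem sufs_spec (r : List String) : ∀ (suffix : List String), suffix ≠ [] →
    sufs (J suffix) r
    = (List.range' 1 r.length).map (fun j => J ((r.take j).reverse ++ suffix)) := by
  induction r with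
  | nil => intro s _; simp [sufs]
  | cons w t ih =>
    intro suffix hsuf
    simp only [sufs, List.length_cons, List.range'_succ, List.map_cons]
    rw [← J_cons suffix w hsuf]
    rw [ih (w :: suffix) (by simp)]
    refine congrArg₂ _ (by simp) ?_
    rw [List.range'_eq_map_range, List.range'_eq_map_range, List.map_map, List.map_map]
    apply List.map_congr_left
    intro a _
    simp only [Function.comp_apply]
    rw [show 1 + 1 + a = (1 + a) + 1 by omega, List.take_succ_cons]
    simp

theorem pref_closed (h : String) (t : List String) :
    (t.foldl (fun p w => p ++ [PySem.List.pyGetD p (-1) "" ++ " " ++ w]) [h])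
    = (List.range' 1 (t.length + 1)).map (fun i => J ((h :: t).take i)) := by
  have := prefFold t [] h
  simp only [List.nil_append] at this
  rw [this, List.range'_succ, List.map_cons]
  rw [show prefs h t = prefs (J [h]) t by rw [J_single]]
  rw [prefs_spec t [h] (by simp)]
  simp [J_single]

theorem suf_closed (arr : List String) (harr : arr ≠ []) :
    (((PySem.List.slice arr none (some (-1))).reverse).foldl
        (fun s w => s ++ [w ++ " " ++ PySem.List.pyGetD s (-1) ""])
        [PySem.List.pyGetD arr (-1) ""]).reverse
    = (List.range' 0 arr.length).map (fun i => J (arr.drop i)) := by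
  have hlen : 1 ≤ arr.length := by
    cases arr with | nil => exact absurd rfl harr | cons a l => simp
  rw [PySem.List.slice_to_neg_one, PySem.List.pyGetD_neg_one _ _ harr]
  have hfold := sufFold (arr.dropLast.reverse) [] (arr.getLast harr)
  simp only [List.nil_append] at hfold
  rw [hfold]
  rw [show arr.getLast harr = J [arr.getLast harr] by rw [J_single]]
  rw [sufs_spec _ [arr.getLast harr] (by simp)]
  -- now both sides are explicit lists; compare elementwise
  apply List.ext_getElem
  · simp [hlen]
  · intro i hi1 hi2
    simp only [List.length_reverse, List.length_append, List.length_map, List.length_range',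
      List.length_cons, List.length_dropLast, List.length_nil] at hi1 hi2
    have hn : i < arr.length := by simpa using hi2
    rw [List.getElem_reverse]
    rw [List.getElem_map, List.getElem_range']
    have hdl : arr.dropLast ++ [arr.getLast harr] = arr := List.dropLast_append_getLast harr
    by_cases hi : i = arr.length - 1
    · have h0 : ([J [arr.getLast harr]] ++
          List.map (fun j => J ((List.take j arr.dropLast.reverse).reverse ++ [arr.getLast harr]))
            (List.range' 1 arr.dropLast.reverse.length)).length - 1 - i = 0 := by
        simp; omega
      simp only [h0]
      have hdrop : List.drop (0 + 1 * i) arr = [arr.getLast harr] := by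
        conv_lhs => rw [← hdl]
        rw [List.drop_append_of_le_length (by simp; omega)]
        have : List.drop (0 + 1 * i) arr.dropLast = [] := by
          apply List.drop_eq_nil_of_le
          simp; omega
        rw [this, List.nil_append]
      rw [hdrop]
      simp
    · -- interior index: comes from the mapped part
      have hL : ([J [arr.getLast harr]] ++
          List.map (fun j => J ((List.take j arr.dropLast.reverse).reverse ++ [arr.getLast harr]))
            (List.range' 1 arr.dropLast.reverse.length)).length - 1 - i
          = 1 + (arr.length - 2 - i) := by simp only [List.length_append, List.length_map, List.length_range', List.length_cons, List.length_nil, List.length_reverse, List.length_dropLast]; omega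
      simp only [hL]
      rw [List.getElem_append_right (by simp)]
      rw [List.getElem_map, List.getElem_range']
      have hj : (1 + (1 * (1 + (arr.length - 2 - i) - [J [arr.getLast harr]].length))) = arr.length - 1 - i := by
        simp; omega
      simp only [hj]
      have htk : (List.take (arr.length - 1 - i) arr.dropLast.reverse).reverse
          = List.drop i arr.dropLast := by
        rw [List.take_reverse, List.reverse_reverse, List.length_dropLast]
        congr 1
        omega
      rw [htk]
      conv_rhs => rw [← hdl]
      rw [List.drop_append_of_le_length (by simp; omega)]
      simp

theorem B_closed (arr : List String) :
    partlist_alt arr = (List.range' 1 (arr.length - 1)).map (F arr) := by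
  by_cases hlen : arr.length < 2
  · have : (arr.length : Int) < 2 := by exact_mod_cast hlen
    rw [partlist_alt, if_pos this]
    have : arr.length - 1 = 0 := by omega
    simp [this]
  · have hInt : ¬ ((arr.length : Int) < 2) := by exact_mod_cast hlen
    have h2 : 2 ≤ arr.length := by omega
    obtain ⟨h, t, rfl⟩ : ∃ h t, arr = h :: t := by
      cases arr with | nil => simp at h2 | cons a l => exact ⟨a, l, rfl⟩
    rw [partlist_alt]
    simp only [if_neg hInt]
    rw [PySem.List.slice_from_one, List.tail_cons, PySem.List.pyGetD_zero_cons]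
    rw [pref_closed, suf_closed _ (by simp), pyRange_one, List.map_map]
    apply List.map_congr_left
    intro j hj
    have hj' : 1 ≤ j ∧ j < (h :: t).length := by
      have := List.mem_range'.mp hj
      obtain ⟨k, hk, rfl⟩ := this
      simp at hk ⊢
      omega
    simp only [Function.comp_apply]
    have e1 : ((j : Int) - 1) = ((j - 1 : Nat) : Int) := by omega
    rw [e1, PySem.List.pyGetD_natCast, PySem.List.pyGetD_natCast]
    have hjt : 1 ≤ j ∧ j < t.length + 1 := by simpa using hj'
    rw [List.getD_eq_getElem _ _ (by simp; omega), List.getD_eq_getElem _ _ (by simp; omega)]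
    rw [List.getElem_map, List.getElem_map, List.getElem_range', List.getElem_range']
    have e2 : 1 + (j - 1) = j := by omega
    simp [F, e2]

-- ===== VERDICT (by name: the statement is the Claim_ definition above) =====
theorem partlist_spec : Claim_equal_partlist := by
  intro arr _
  unfold Spec_partlist
  rw [A_closed, B_closed]
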